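-- pv_equiv track=rewrite | github.com/PrairieLearn/PrairieLearn | python/prairielearn.py | index2key
-- ===== SOURCE A (Python) =====
-- def index2key(i):
--     """
--     index2key(i)
--
--     Used when generating ordered lists of the form ['a', 'b', ..., 'z', 'aa', 'ab', ..., 'zz', 'aaa', 'aab', ...]
--
--     Returns alphabetic key in the form [a-z]* from a given integer (i = 0, 1, 2, ...).
--     """
--     if i >= 26:
--         n = i
--         base_26_str = ''
--         while not n < 26:
--             base_26_str = '{:02d}'.format(n % 26) + base_26_str
--             n = n // 26 - 1
--         base_26_str = '{:02d}'.format(n) + base_26_str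
--         base_26_int = [int(base_26_str[i:i + 2]) for i in range(0, len(base_26_str), 2)]
--         key = ''.join([chr(ord('a') + i) for i in base_26_int])
--     else:
--         key = chr(ord('a') + i)
--
--     return key
-- ===== SOURCE B (Python) =====
-- def index2key(i):
--     """
--     index2key(i)
--
--     Returns alphabetic key in the form [a-z]* from a given integer (i = 0, 1, 2, ...).
--     """
--     if i < 26:
--         return chr(ord('a') + i)
--     # Length-first algorithm: find the key length L and the index `first` of the
--     # first key of that length, then write i - first in ORDINARY base 26,
--     # zero-padded to L digits.  Correct because the length-L keys occupy the
--     # contiguous index range [first, first + 26**L) in order.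
--     L, first, block = 1, 0, 26
--     while i >= first + block:
--         first += block
--         block *= 26
--         L += 1
--     r = i - first
--     digits = []
--     for _ in range(L):
--         digits.append(r % 26)
--         r //= 26
--     return ''.join(chr(ord('a') + d) for d in reversed(digits))
-- ===== Notes on version B (the rewrite author's own statement) =====
-- stated objective: alternative
-- what changed: A computes bijective base-26 digits with a n%26 / n=n//26-1 loop routed through a zero-padded digit string that is re-sliced and re-parsed; B first finds the key length L and the start index of the length-L block by summing powers of 26, then writes the offset i-first in ordinary base 26 padded to L digits.
import Mathlib
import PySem

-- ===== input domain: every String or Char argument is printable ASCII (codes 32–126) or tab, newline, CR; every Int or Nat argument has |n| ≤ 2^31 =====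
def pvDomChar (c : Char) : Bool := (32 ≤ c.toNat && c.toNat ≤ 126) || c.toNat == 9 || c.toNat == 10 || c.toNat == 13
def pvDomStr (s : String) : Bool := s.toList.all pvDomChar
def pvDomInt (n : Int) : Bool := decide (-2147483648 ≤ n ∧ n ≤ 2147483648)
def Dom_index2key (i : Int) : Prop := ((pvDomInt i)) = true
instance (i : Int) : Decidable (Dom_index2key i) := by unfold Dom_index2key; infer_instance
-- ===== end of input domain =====

-- index2key: B replaces A's bijective-base-26 format/re-parse pipeline by a
-- length-first algorithm (find the key length L and the first index of that
-- length, then write the offset in ordinary base 26); objective: alternative.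


-- ===== PORT A =====
-- '{:02d}'.format(m) — identical to str(m).zfill(2) for every int (sign stays in front)
def pvFmt02 (m : Int) : List Char := PySem.Chars.zfill (PySem.Int.toChars m) 2

-- the while-loop of A: the final "base_26_str = '{:02d}'.format(n) + base_26_str"
-- (executed once, when n < 26) is the base case; strings carried as List Char
def index2keyLoop (n : Int) (acc : List Char) : List Char :=
  if n < 26 then pvFmt02 n ++ acc
  else index2keyLoop (PySem.Int.floordiv n 26 - 1) (pvFmt02 (PySem.Int.mod n 26) ++ acc)
termination_by (n + 1).toNat
decreasing_by
  rw [PySem.Int.floordiv_eq_ediv_of_pos (by omega : (0:Int) < 26)]; omega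

def index2key (i : Int) : String :=
  if i ≥ 26 then
    let s : List Char := index2keyLoop i []
    -- int(base_26_str[i:i+2]) never raises here (each 2-char block is a decimal
    -- literal produced by the loop), so the .getD 0 default is unreachable
    let base26 : List Int :=
      (PySem.List.pyRange 0 (PySem.List.len s) 2).map
        (fun j => (PySem.Int.ofChars? (PySem.List.slice s (some j) (some (j + 2)))).getD 0)
    -- ''.join([chr(ord('a') + i) for i in base_26_int])
    String.ofList (base26.map (fun d => Char.ofNat (97 + d).toNat))
  else String.ofList [Char.ofNat (97 + i).toNat]   -- chr(ord('a') + i)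

-- ===== PORT B =====
-- the while-loop of B ('0 < block' is only a totality guard; in Source B block is always > 0)
def index2keyFindLoop (i first block : Int) (L : Nat) : Nat × Int :=
  if 0 < block ∧ first + block ≤ i then
    index2keyFindLoop i (first + block) (block * 26) (L + 1)
  else (L, first)
termination_by (i - first).toNat
decreasing_by omega

-- the 'for _ in range(L)' loop of B: appends r % 26, then r //= 26
def index2keyDigits : Nat → Int → List Int
  | 0, _ => []
  | L + 1, r => PySem.Int.mod r 26 :: index2keyDigits L (PySem.Int.floordiv r 26)

def index2key_alt (i : Int) : String :=
  if i < 26 then String.ofList [Char.ofNat (97 + i).toNat]   -- chr(ord('a') + i)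
  else
    let p := index2keyFindLoop i 0 26 1
    let digits := index2keyDigits p.1 (i - p.2)
    -- ''.join(chr(ord('a') + d) for d in reversed(digits))
    String.ofList (digits.reverse.map (fun d => Char.ofNat (97 + d).toNat))

-- ===== PRECONDITION & SPEC =====
-- Pre_ excludes exactly i < -97, where chr(ord('a') + i) raises ValueError in both A and B.
def Pre_index2key (i : Int) : Prop := -97 ≤ i
instance (i : Int) : Decidable (Pre_index2key i) := by unfold Pre_index2key; infer_instance
def pvWitness_index2key : Int := (30)

def Spec_index2key (i : Int) (out : String) : Prop := out = index2key_alt i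
instance (i : Int) (out : String) : Decidable (Spec_index2key i out) := by unfold Spec_index2key; infer_instance

-- ===== CLAIM (what is proved, stated in full; the proofs are below) =====
def Claim_equal_index2key : Prop := ∀ (i : Int), Dom_index2key i → Pre_index2key i → Spec_index2key i (index2key i)

-- ===== LEMMAS AND PROOFS =====

-- the bijective base-26 digit sequence A is built from (proof-only helper)
def pvDigits (n : Int) : List Int :=
  if n < 26 then [n]
  else pvDigits (PySem.Int.floordiv n 26 - 1) ++ [PySem.Int.mod n 26]
termination_by (n + 1).toNat
decreasing_by
  rw [PySem.Int.floordiv_eq_ediv_of_pos (by omega : (0:Int) < 26)]; omega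

def pvLetter (d : Int) : Char := Char.ofNat (97 + d).toNat

-- index of the first key of length L (L ≥ 1); pvFirst 0 is unused
def pvFirst : Nat → Int
  | 0 => 0
  | 1 => 0
  | (L + 2) => pvFirst (L + 1) + 26 ^ (L + 1)

lemma pvFirst_succ (L : Nat) (h : 1 ≤ L) : pvFirst (L + 1) = pvFirst L + 26 ^ L := by
  cases L with
  | zero => omega
  | succ k => rfl

lemma pvFirst_mul25 (L : Nat) (h : 1 ≤ L) : 25 * pvFirst L = 26 ^ L - 26 := by
  induction L with
  | zero => omega
  | succ L ih =>
    rcases Nat.eq_or_lt_of_le h with h1 | h1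
    · simp [← h1, pvFirst]
    · have hL : 1 ≤ L := by omega
      rw [pvFirst_succ L hL, mul_add, ih hL, pow_succ]
      ring

lemma pvFirst_dvd (L : Nat) : (26 : Int) ∣ pvFirst L := by
  induction L with
  | zero => simp [pvFirst]
  | succ L ih =>
    match L, ih with
    | 0, _ => simp [pvFirst]
    | L + 1, ih =>
      rw [pvFirst]
      exact dvd_add ih (dvd_pow_self _ (by omega))

lemma pow26_pos (L : Nat) : (0 : Int) < 26 ^ L := pow_pos (by omega) L

lemma pow26_dvd (L : Nat) (h : 1 ≤ L) : (26 : Int) ∣ 26 ^ L := dvd_pow_self _ (by omega)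

lemma findLoop_spec (i : Int) : ∀ (first block : Int) (L : Nat),
    1 ≤ L → first = pvFirst L → block = 26 ^ L → first ≤ i →
    1 ≤ (index2keyFindLoop i first block L).1 ∧
    (index2keyFindLoop i first block L).2 = pvFirst (index2keyFindLoop i first block L).1 ∧
    pvFirst (index2keyFindLoop i first block L).1 ≤ i ∧
    i < pvFirst (index2keyFindLoop i first block L).1 + 26 ^ (index2keyFindLoop i first block L).1 := by
  intro first block L
  induction first, block, L using index2keyFindLoop.induct (i := i) with
  | case1 first block L hcond ih =>
    intro hL hf hb hi
    rw [index2keyFindLoop, if_pos hcond]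
    exact ih (by omega) (by rw [hf, hb, pvFirst_succ L hL]) (by rw [hb, pow_succ]) (by omega)
  | case2 first block L hcond =>
    intro hL hf hb hi
    rw [index2keyFindLoop, if_neg hcond]
    dsimp only
    have hpos : 0 < block := by rw [hb]; exact pow26_pos L
    refine ⟨hL, hf, hf ▸ hi, ?_⟩
    have : ¬ first + block ≤ i := fun h => hcond ⟨hpos, h⟩
    omega

-- ordinary base-26 digits of the offset, reversed, equal A's bijective digits
lemma digits_eq_pvDigits (L : Nat) (hL : 1 ≤ L) :
    ∀ n : Int, pvFirst L ≤ n → n < pvFirst L + 26 ^ L →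
    (index2keyDigits L (n - pvFirst L)).reverse = pvDigits n := by
  induction L with
  | zero => omega
  | succ L ih =>
    intro n hlo hhi
    rcases Nat.eq_or_lt_of_le hL with h1 | h1
    · -- L + 1 = 1
      have hL0 : L = 0 := by omega
      subst hL0
      have h0 : pvFirst 1 = 0 := rfl
      rw [h0] at hlo hhi
      have h26 : (26:Int) ^ 1 = 26 := by norm_num
      rw [h26] at hhi
      simp only [index2keyDigits, h0, sub_zero, List.reverse_cons, List.reverse_nil,
        List.nil_append]
      rw [pvDigits, if_pos (by omega)]
      have hm : PySem.Int.mod n 26 = n % 26 := PySem.Int.mod_eq_emod_of_pos (by omega)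
      rw [hm]
      congr 1
      omega
    · have hL1 : 1 ≤ L := by omega
      have hsucc : pvFirst (L + 1) = pvFirst L + 26 ^ L := pvFirst_succ L hL1
      have h25 : 25 * pvFirst L = 26 ^ L - 26 := pvFirst_mul25 L hL1
      obtain ⟨a, ha⟩ := pvFirst_dvd L
      obtain ⟨q, hq⟩ := pow26_dvd L hL1
      have hqpos : (0:Int) < 26 ^ L := pow26_pos L
      have hpow : (26:Int) ^ (L + 1) = 26 * 26 ^ L := by rw [pow_succ]; ring
      have hn26 : (26:Int) ≤ n := by
        have h0 : (0:Int) ≤ pvFirst L := by omega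
        omega
      -- unfold one step of both sides
      rw [pvDigits, if_neg (by omega)]
      simp only [index2keyDigits, List.reverse_cons]
      set r := n - pvFirst (L + 1) with hr
      have hrnn : 0 ≤ r := by omega
      have hmod : PySem.Int.mod r 26 = PySem.Int.mod n 26 := by
        rw [PySem.Int.mod_eq_emod_of_pos (by omega), PySem.Int.mod_eq_emod_of_pos (by omega)]
        omega
      have hdivr : PySem.Int.floordiv r 26 = r / 26 := PySem.Int.floordiv_eq_ediv_of_pos (by omega)
      have hdivn : PySem.Int.floordiv n 26 = n / 26 := PySem.Int.floordiv_eq_ediv_of_pos (by omega)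
      have hkey : r / 26 = (n / 26 - 1) - pvFirst L := by omega
      have hlo' : pvFirst L ≤ n / 26 - 1 := by omega
      have hhi' : n / 26 - 1 < pvFirst L + 26 ^ L := by omega
      rw [hmod, hdivr, hkey, ih hL1 (n / 26 - 1) hlo' hhi', hdivn]

lemma pvDigits_bounds (n : Int) (h : 0 ≤ n) : ∀ d ∈ pvDigits n, 0 ≤ d ∧ d < 26 := by
  induction n using pvDigits.induct with
  | case1 n hlt =>
    rw [pvDigits, if_pos hlt]
    simpa using ⟨h, hlt⟩
  | case2 n hlt ih =>
    rw [pvDigits, if_neg hlt]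
    have hd : PySem.Int.floordiv n 26 = n / 26 :=
      PySem.Int.floordiv_eq_ediv_of_pos (by omega)
    have hm : PySem.Int.mod n 26 = n % 26 :=
      PySem.Int.mod_eq_emod_of_pos (by omega)
    intro d hdm
    rcases List.mem_append.mp hdm with h1 | h1
    · exact ih (by omega) d h1
    · simp at h1; omega

lemma index2keyLoop_eq (n : Int) (acc : List Char) :
    index2keyLoop n acc = ((pvDigits n).map pvFmt02).flatten ++ acc := by
  induction n using pvDigits.induct generalizing acc with
  | case1 n hlt =>
    rw [index2keyLoop, if_pos hlt, pvDigits, if_pos hlt]; simp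
  | case2 n hlt ih =>
    rw [index2keyLoop, if_neg hlt, pvDigits, if_neg hlt, ih]
    simp

lemma pvFmt02_spec (d : Int) (h0 : 0 ≤ d) (h26 : d < 26) :
    (pvFmt02 d).length = 2 ∧ PySem.Int.ofChars? (pvFmt02 d) = some d := by
  interval_cases d <;> exact ⟨by decide, by decide⟩

lemma chunk_eq (ds : List Int) (hb : ∀ d ∈ ds, 0 ≤ d ∧ d < 26) (k : Nat) (hk : k < ds.length) :
    (((ds.map pvFmt02).flatten.drop (2 * k)).take 2) = pvFmt02 ds[k] := by
  induction ds generalizing k with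
  | nil => simp at hk
  | cons d ds ih =>
    have hlen : (pvFmt02 d).length = 2 :=
      (pvFmt02_spec d (hb d (by simp)).1 (hb d (by simp)).2).1
    cases k with
    | zero =>
      simp only [List.map_cons, List.flatten_cons, Nat.mul_zero, List.drop_zero]
      rw [List.take_append_of_le_length (by omega)]
      exact List.take_of_length_le (by omega)
    | succ k =>
      simp only [List.map_cons, List.flatten_cons]
      rw [show 2 * (k + 1) = (pvFmt02 d).length + 2 * k by omega,
          List.drop_append]
      rw [List.drop_eq_nil_of_le (by omega), List.nil_append]
      simpa using ih (fun x hx => hb x (by simp [hx])) k (by simpa using hk)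

lemma flatten_len (ds : List Int) (hb : ∀ d ∈ ds, 0 ≤ d ∧ d < 26) :
    ((ds.map pvFmt02).flatten).length = 2 * ds.length := by
  induction ds with
  | nil => simp
  | cons d ds ih =>
    have hlen : (pvFmt02 d).length = 2 :=
      (pvFmt02_spec d (hb d (by simp)).1 (hb d (by simp)).2).1
    simp [hlen, ih (fun x hx => hb x (by simp [hx]))]
    omega

lemma parse_eq (ds : List Int) (hb : ∀ d ∈ ds, 0 ≤ d ∧ d < 26) :
    (PySem.List.pyRange 0 (PySem.List.len ((ds.map pvFmt02).flatten)) 2).map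
      (fun j => (PySem.Int.ofChars? (PySem.List.slice ((ds.map pvFmt02).flatten)
                    (some j) (some (j + 2)))).getD 0) = ds := by
  rw [PySem.List.len_eq, flatten_len ds hb,
      PySem.List.pyRange_of_pos _ _ (by omega : (0:Int) < 2)]
  apply List.ext_getElem
  · simp only [List.length_map, List.length_range]
    by_cases hL : ds.length = 0
    · simp [hL]
    · rw [if_pos (by push_cast; omega)]
      push_cast
      omega
  intro k h1 h2
  simp only [List.getElem_map, List.getElem_range]
  rw [show (0:Int) + 2 * (k:Int) = ((2 * k : Nat) : Int) by push_cast; ring]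
  rw [show ((2 * k : Nat) : Int) + 2 = (((2 * k + 2) : Nat) : Int) by push_cast; ring,
      PySem.List.slice_natCast, show 2 * k + 2 - 2 * k = 2 by omega]
  have hk : k < ds.length := by simpa using h2
  rw [chunk_eq ds hb k hk]
  rw [(pvFmt02_spec ds[k] (hb _ (List.getElem_mem hk)).1 (hb _ (List.getElem_mem hk)).2).2]
  rfl

-- ===== VERDICT (by name: the statement is the Claim_ definition above) =====
theorem index2key_spec : Claim_equal_index2key := by
  intro i _ _
  unfold Spec_index2key index2key index2key_alt
  by_cases h : i < 26
  · rw [if_neg (by omega), if_pos h]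
  · rw [if_pos (by omega), if_neg h]
    simp only []
    rw [index2keyLoop_eq i [], List.append_nil,
        parse_eq (pvDigits i) (pvDigits_bounds i (by omega))]
    obtain ⟨hL1, hfst, hlo, hhi⟩ :=
      findLoop_spec i 0 26 1 (by omega) rfl (by norm_num) (by omega)
    rw [hfst, digits_eq_pvDigits _ hL1 i hlo hhi]
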